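-- pv_equiv track=rewrite | github.com/wjddn1029/AlgorithmStudy | 연습_J/practice5_1.py | solution
-- ===== SOURCE A (Python) =====
-- def solution(n):
--     result = []
--     answer = 0
--     for i in range(1, 1000000):
--         a, b = divmod(i, n)
--         if a == b:
--             result.append(i)
--     for value in result:
--         answer += value
--     return answer
-- ===== SOURCE B (Python) =====
-- def solution(n):
--     # Closed form: i has equal quotient and remainder mod n iff i = a*(n+1)
--     # (resp. a*|n+1| for negative n) with 1 <= a <= |n|-1; sum the arithmetic series.
--     step = abs(n + 1)
--     if step == 0:
--         return 0
--     top = min(abs(n) - 1, 999999 // step)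
--     if top < 1:
--         return 0
--     return step * top * (top + 1) // 2
-- ===== Notes on version B (the rewrite author's own statement) =====
-- stated objective: faster
-- what changed: Replaced the million-iteration scan over range(1,1000000) testing divmod(i,n) by the closed-form arithmetic series: the qualifying i are exactly a*|n+1| for 1 <= a <= min(|n|-1, 999999//|n+1|), summed with Gauss's formula.
import Mathlib
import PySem

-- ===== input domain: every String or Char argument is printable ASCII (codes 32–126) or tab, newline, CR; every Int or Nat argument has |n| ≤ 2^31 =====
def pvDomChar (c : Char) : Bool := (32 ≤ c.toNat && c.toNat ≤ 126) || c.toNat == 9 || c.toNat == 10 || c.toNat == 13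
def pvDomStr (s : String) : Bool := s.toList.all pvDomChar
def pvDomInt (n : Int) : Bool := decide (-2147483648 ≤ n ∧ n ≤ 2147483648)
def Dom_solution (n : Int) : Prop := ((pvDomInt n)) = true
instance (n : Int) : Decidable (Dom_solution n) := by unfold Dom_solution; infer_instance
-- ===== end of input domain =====

-- B replaces A's million-step scan by the O(1) closed-form arithmetic-series sum.

-- ===== PORT A =====
-- divmod(i, n) is ported with the total PySem.Int.floordiv/mod; exact for n ≠ 0 (Pre_).
def solution (n : Int) : Int :=
  let result : List Int :=
    (PySem.List.pyRange 1 1000000 1).foldl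
      (fun acc i =>
        let a := PySem.Int.floordiv i n
        let b := PySem.Int.mod i n
        if a = b then acc ++ [i] else acc) []
  result.foldl (fun answer value => answer + value) 0

-- ===== PORT B =====
def solution_alt (n : Int) : Int :=
  let step : Int := |n + 1|
  if step = 0 then 0
  else
    let top : Int := min (|n| - 1) (PySem.Int.floordiv 999999 step)
    if top < 1 then 0
    else PySem.Int.floordiv (step * top * (top + 1)) 2

-- ===== PRECONDITION & SPEC =====
-- Pre_ excludes exactly n = 0, where Python's divmod raises ZeroDivisionError.
def Pre_solution (n : Int) : Prop := n ≠ 0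
instance (n : Int) : Decidable (Pre_solution n) := by unfold Pre_solution; infer_instance
def pvWitness_solution : Int := 3

def Spec_solution (n : Int) (out : Int) : Prop := out = solution_alt n
instance (n : Int) (out : Int) : Decidable (Spec_solution n out) := by unfold Spec_solution; infer_instance

-- ===== CLAIM (what is proved, stated in full; the proofs are below) =====
def Claim_equal_solution : Prop := ∀ (n : Int), Dom_solution n → Pre_solution n → Spec_solution n (solution n)

-- ===== LEMMAS AND PROOFS =====

-- Pointwise characterisation: for i ≥ 1 and n ≠ 0, quotient = remainder iff i = a*|n+1| with 1 ≤ a ≤ |n|-1.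
lemma pv_cond_iff (n i : Int) (hn : n ≠ 0) (hi : 1 ≤ i) :
    (PySem.Int.floordiv i n = PySem.Int.mod i n) ↔
      ∃ a : Int, 1 ≤ a ∧ a ≤ |n| - 1 ∧ i = a * |n + 1| := by
  have key := PySem.Int.floordiv_mul_add_mod i n
  rcases lt_or_gt_of_ne hn with hneg | hpos
  · -- n < 0
    have hm : (0:Int) < -n := by omega
    have hd : PySem.Int.floordiv i n = PySem.Int.floordiv (-i) (-n) := by
      have := PySem.Int.floordiv_neg_neg (-i) (-n); simpa using this.symm
    have hmm : PySem.Int.mod i n = -(PySem.Int.mod (-i) (-n)) := by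
      have := PySem.Int.mod_neg_neg (-i) (-n); simpa using this
    have habs : |n| = -n := abs_of_neg hneg
    have habs1 : |n + 1| = -(n + 1) := by
      rcases eq_or_lt_of_le (show n + 1 ≤ 0 by omega) with h | h
      · rw [h]; simp
      · exact abs_of_neg h
    constructor
    · intro h
      have hr0 : 0 ≤ PySem.Int.mod (-i) (-n) := by
        rw [PySem.Int.mod_eq_emod_of_pos hm]; exact Int.emod_nonneg _ (by omega)
      have hrlt : PySem.Int.mod (-i) (-n) < -n := by
        rw [PySem.Int.mod_eq_emod_of_pos hm]; exact Int.emod_lt_of_pos _ hm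
      set r := PySem.Int.mod (-i) (-n) with hrdef
      refine ⟨r, ?_, by omega, ?_⟩
      · -- r ≥ 1: if r = 0 then i = 0
        by_contra hcon
        have hr0' : r = 0 := by omega
        rw [hd, hmm, hr0', neg_zero] at h key
        rw [h] at key
        simp at key; omega
      · rw [hd, hmm] at key h
        rw [habs1]
        have hq : PySem.Int.floordiv (-i) (-n) = -r := by omega
        rw [hq] at key
        nlinarith [key]
    · rintro ⟨a, h1, h2, heq⟩
      rw [habs1] at heq
      rw [habs] at h2
      -- i = a * (-(n+1)); show floordiv (-i) (-n) = -a and mod (-i) (-n) = a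
      have e1 : -i = (-a) * (-n) + a := by rw [heq]; ring
      have hq : PySem.Int.floordiv (-i) (-n) = -a := by
        rw [PySem.Int.floordiv_eq_iff_of_pos hm]
        constructor
        · nlinarith
        · nlinarith
      have key2 := PySem.Int.floordiv_mul_add_mod (-i) (-n)
      rw [hq] at key2
      have hr : PySem.Int.mod (-i) (-n) = a := by nlinarith [key2]
      rw [hd, hmm, hq, hr]
    -- 0 < n
  · have habs : |n| = n := abs_of_pos hpos
    have habs1 : |n + 1| = n + 1 := abs_of_pos (by omega)
    constructor
    · intro h
      have hr0 : 0 ≤ PySem.Int.mod i n := by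
        rw [PySem.Int.mod_eq_emod_of_pos hpos]; exact Int.emod_nonneg _ (by omega)
      have hrlt : PySem.Int.mod i n < n := by
        rw [PySem.Int.mod_eq_emod_of_pos hpos]; exact Int.emod_lt_of_pos _ hpos
      set r := PySem.Int.mod i n with hrdef
      refine ⟨r, ?_, by omega, ?_⟩
      · by_contra hcon
        have hr0' : r = 0 := by omega
        rw [h, hr0'] at key; simp at key; omega
      · rw [h] at key; rw [habs1]; nlinarith [key]
    · rintro ⟨a, h1, h2, heq⟩
      rw [habs1] at heq; rw [habs] at h2
      have hq : PySem.Int.floordiv i n = a := by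
        rw [PySem.Int.floordiv_eq_iff_of_pos hpos]
        constructor
        · nlinarith
        · nlinarith
      have hr : PySem.Int.mod i n = a := by
        rw [hq] at key; nlinarith [key]
      rw [hq, hr]

lemma pv_foldl_filter (n : Int) (l : List Int) (acc : List Int) :
    l.foldl (fun acc i => if PySem.Int.floordiv i n = PySem.Int.mod i n then acc ++ [i] else acc) acc
      = acc ++ l.filter (fun i => decide (PySem.Int.floordiv i n = PySem.Int.mod i n)) := by
  induction l generalizing acc with
  | nil => simp
  | cons x xs ih =>
      by_cases h : PySem.Int.floordiv x n = PySem.Int.mod x n <;>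
        simp [h, ih]

lemma pv_foldl_add (l : List Int) (acc : Int) :
    l.foldl (fun a v => a + v) acc = acc + l.sum := by
  induction l generalizing acc with
  | nil => simp
  | cons x xs ih => simp [List.foldl_cons, ih, add_assoc]

-- Gauss: twice the sum of 1..k
lemma pv_gauss (k : Nat) :
    2 * (PySem.List.pyRange 1 ((k : Int) + 1)).sum = (k : Int) * ((k : Int) + 1) := by
  induction k with
  | zero => rw [PySem.List.pyRange_one_eq_nil (by norm_num)]; simp
  | succ m ih =>
      have h : PySem.List.pyRange 1 ((m : Int) + 1 + 1) =
          PySem.List.pyRange 1 ((m : Int) + 1) ++ [(m : Int) + 1] :=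
        PySem.List.pyRange_one_succ_right (by omega)
      push_cast
      rw [h, List.sum_append]
      push_cast at ih
      simp only [List.sum_cons, List.sum_nil]
      nlinarith [ih]

-- The filtered list of A equals the arithmetic progression, for s = |n+1| > 0.
lemma pv_filter_eq (n : Int) (hn : n ≠ 0) (hs : 0 < |n + 1|) :
    (PySem.List.pyRange 1 1000000).filter
        (fun i => decide (PySem.Int.floordiv i n = PySem.Int.mod i n)) =
      (PySem.List.pyRange 1 (min (|n| - 1) (PySem.Int.floordiv 999999 |n + 1|) + 1)).map
        (· * |n + 1|) := by
  have hmem : ∀ i : Int,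
      (i ∈ (PySem.List.pyRange 1 1000000).filter
        (fun i => decide (PySem.Int.floordiv i n = PySem.Int.mod i n))) ↔
      (i ∈ (PySem.List.pyRange 1 (min (|n| - 1) (PySem.Int.floordiv 999999 |n + 1|) + 1)).map (· * |n + 1|)) := by
    intro i
    rw [List.mem_filter, PySem.List.mem_pyRange_one, List.mem_map]
    constructor
    · rintro ⟨⟨hi1, hi2⟩, hc⟩
      have hc' : PySem.Int.floordiv i n = PySem.Int.mod i n := by simpa using hc
      rcases (pv_cond_iff n i hn hi1).mp hc' with ⟨a, ha1, ha2, rfl⟩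
      refine ⟨a, ?_, rfl⟩
      rw [PySem.List.mem_pyRange_one]
      have hle : a ≤ PySem.Int.floordiv 999999 |n + 1| :=
        (PySem.Int.le_floordiv_iff_mul_le hs).mpr (by omega)
      exact ⟨ha1, by omega⟩
    · rintro ⟨a, ha, rfl⟩
      rw [PySem.List.mem_pyRange_one] at ha
      have ha1 : 1 ≤ a := ha.1
      have hfd : a ≤ PySem.Int.floordiv 999999 |n + 1| := by omega
      have hub : a * |n + 1| ≤ 999999 := (PySem.Int.le_floordiv_iff_mul_le hs).mp hfd
      have hlb : 1 ≤ a * |n + 1| := by nlinarith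
      refine ⟨⟨hlb, by omega⟩, ?_⟩
      simp only [decide_eq_true_eq]
      exact (pv_cond_iff n (a * |n + 1|) hn hlb).mpr ⟨a, ha1, by omega, rfl⟩
  have hp1 : List.Pairwise (· < ·)
      ((PySem.List.pyRange (1:Int) 1000000).filter
        (fun i => decide (PySem.Int.floordiv i n = PySem.Int.mod i n))) :=
    (PySem.List.pairwise_lt_pyRange_one 1 1000000).filter _
  have hp2 : List.Pairwise (· < ·)
      ((PySem.List.pyRange (1:Int) (min (|n| - 1) (PySem.Int.floordiv 999999 |n + 1|) + 1)).map (· * |n + 1|)) := by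
    refine List.Pairwise.map _ ?_ (PySem.List.pairwise_lt_pyRange_one 1 _)
    intro a b hab
    exact mul_lt_mul_of_pos_right hab hs
  have hnd1 := hp1.nodup
  have hnd2 := hp2.nodup
  have hperm : ((PySem.List.pyRange (1:Int) 1000000).filter
        (fun i => decide (PySem.Int.floordiv i n = PySem.Int.mod i n))).Perm
      ((PySem.List.pyRange (1:Int) (min (|n| - 1) (PySem.Int.floordiv 999999 |n + 1|) + 1)).map (· * |n + 1|)) := by
    refine List.perm_of_nodup_nodup_toFinset_eq hnd1 hnd2 ?_
    ext x
    simp only [List.mem_toFinset]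
    exact hmem x
  exact List.Perm.eq_of_pairwise (fun a b _ _ h1 h2 => by omega) hp1 hp2 hperm

-- ===== VERDICT (by name: the statement is the Claim_ definition above) =====
theorem solution_spec : Claim_equal_solution := by
  intro n _ hn
  show solution n = solution_alt n
  simp only [solution, solution_alt]
  rw [pv_foldl_filter, List.nil_append, pv_foldl_add, zero_add]
  by_cases hs : |n + 1| = 0
  · -- n = -1 : no i qualifies; B returns 0
    rw [if_pos hs]
    have hfil : (PySem.List.pyRange (1:Int) 1000000).filter
        (fun i => decide (PySem.Int.floordiv i n = PySem.Int.mod i n)) = [] := by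
      refine List.filter_eq_nil_iff.mpr ?_
      intro i hi
      rw [PySem.List.mem_pyRange_one] at hi
      simp only [decide_eq_true_eq]
      intro hc
      rcases (pv_cond_iff n i hn hi.1).mp hc with ⟨a, _, _, heq⟩
      rw [hs] at heq; omega
    rw [hfil]; simp
  · rw [if_neg hs]
    have hs' : 0 < |n + 1| := lt_of_le_of_ne (abs_nonneg _) (Ne.symm hs)
    rw [pv_filter_eq n hn hs']
    by_cases htl : min (|n| - 1) (PySem.Int.floordiv 999999 |n + 1|) < 1
    · rw [if_pos htl, PySem.List.pyRange_one_eq_nil (by omega)]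
      simp
    · rw [if_neg htl]
      rw [not_lt] at htl
      have htn : (((min (|n| - 1) (PySem.Int.floordiv 999999 |n + 1|)).toNat : Int))
          = min (|n| - 1) (PySem.Int.floordiv 999999 |n + 1|) := Int.toNat_of_nonneg (by omega)
      have hg := pv_gauss (min (|n| - 1) (PySem.Int.floordiv 999999 |n + 1|)).toNat
      rw [htn] at hg
      rw [List.sum_map_mul_right, List.map_id']
      rw [eq_comm, PySem.Int.floordiv_eq_iff_of_pos (show (0:Int) < 2 by norm_num)]
      constructor
      · nlinarith [hg]
      · nlinarith [hg]
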